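-- pv_equiv track=rewrite | github.com/Kawser-nerd/CLCDSA | Source Codes/AtCoder/agc016/A/4662391.py | f
-- ===== SOURCE A (Python) =====
-- def f(s,w):
--     cnt = 0
--     k = s.count(w)
--     length = len(s)
--     while True:
--         if k==length:
--             break
--         s_=''
--         for i in range(len(s)-1):
--             if s[i+1]==w:
--                 s_+=w
--             else:
--                 s_+=s[i]
--         length-=1
--         k = s_.count(w)
--         s = s_
--         cnt+=1
--     return cnt
-- ===== SOURCE B (Python) =====
-- def f(s, w):
--     # One reverse pass: d = distance from position i to the nearest w at or
--     # after i (or to the end of the string if w never occurs to the right);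
--     # the answer is the maximum such distance.
--     ans = 0
--     d = 0
--     for ch in reversed(s):
--         d = 0 if ch == w else d + 1
--         if d > ans:
--             ans = d
--     return ans
-- ===== Notes on version B (the rewrite author's own statement) =====
-- stated objective: faster
-- what changed: Instead of repeatedly rebuilding the string (propagating w one step and truncating) until it is all w, B makes a single reverse scan keeping the distance to the nearest w at-or-after each position (string end counts as a virtual w) and returns the maximum distance.
-- outside the precondition, e.g. on f('ab', ''): A does not finish within the time limit, B returns 2
import Mathlib
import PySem

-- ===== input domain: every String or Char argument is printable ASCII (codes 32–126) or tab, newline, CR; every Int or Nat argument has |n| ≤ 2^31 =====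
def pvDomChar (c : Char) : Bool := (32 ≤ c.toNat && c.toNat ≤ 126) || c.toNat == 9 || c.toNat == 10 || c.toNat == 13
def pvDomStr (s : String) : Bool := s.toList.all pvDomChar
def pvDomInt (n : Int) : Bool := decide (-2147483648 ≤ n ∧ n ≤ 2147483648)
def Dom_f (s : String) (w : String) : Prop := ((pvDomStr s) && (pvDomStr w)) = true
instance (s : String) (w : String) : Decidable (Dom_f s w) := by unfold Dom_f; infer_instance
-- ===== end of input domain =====

-- B replaces A's rebuild-the-string-until-all-w loop by a single reverse scan
-- (maximum distance to the nearest w to the right); return values proved equal on Pre_f (w ≠ "").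

-- ===== PORT A =====
-- the inner for-loop of A: s_ += (w if s[i+1]==w else s[i]) over adjacent pairs
def fStep (w : String) : List Char → List Char
  | a :: b :: t => (if String.ofList [b] = w then w.toList else [a]) ++ fStep w (b :: t)
  | _ => []

-- cited by fLoop's decreasing_by: each pass shortens the string by exactly one
theorem fStep_length (w : String) (a : Char) (t : List Char) :
    (fStep w (a :: t)).length = t.length := by
  induction t generalizing a with
  | nil => simp [fStep]
  | cons b t2 ih =>
    show (_ ++ fStep w (b :: t2)).length = _
    rw [List.length_append, ih b]
    have h1 : (if String.ofList [b] = w then w.toList else [a]).length = 1 := by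
      split_ifs with h
      · rw [show w.toList = [b] by rw [← h, String.toList_ofList]]; rfl
      · rfl
    rw [h1, List.length_cons]
    omega

-- the while-loop of A; l is the current string, length and cnt the Python variables.
-- When l = '' and k ≠ length the Python loops forever (only reachable for w = "",
-- excluded by Pre_f); the port returns cnt there as a totality guard.
def fLoop (w : String) (l : List Char) (length cnt : Int) : Int :=
  let k : Int := (PySem.Str.count (String.ofList l) w : Int)
  if k = length then cnt
  else
    match l with
    | [] => cnt
    | a :: t => fLoop w (fStep w (a :: t)) (length - 1) (cnt + 1)
termination_by l.length
decreasing_by simp [fStep_length]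

def f (s : String) (w : String) : Int :=
  fLoop w s.toList ((PySem.Str.len s : Int)) 0

-- ===== PORT B =====
-- Source B: one pass over reversed(s); d = current distance to nearest w (or to the end)
def f_alt (s : String) (w : String) : Int :=
  (s.toList.reverse.foldl
    (fun (st : Int × Int) ch =>
      let d : Int := if String.ofList [ch] = w then 0 else st.2 + 1
      (if d > st.1 then d else st.1, d))
    (0, 0)).1

-- ===== PRECONDITION & SPEC =====
-- Pre_f excludes only w = "": there Python A never terminates (k = s.count('') = len+1 never equals length).
def Pre_f (s : String) (w : String) : Prop := w ≠ ""
instance (s : String) (w : String) : Decidable (Pre_f s w) := by unfold Pre_f; infer_instance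
def pvWitness_f : String × String := ("abwb", "w")

def Spec_f (s : String) (w : String) (out : Int) : Prop := out = f_alt s w
instance (s : String) (w : String) (out : Int) : Decidable (Spec_f s w out) := by unfold Spec_f; infer_instance

-- ===== CLAIM (what is proved, stated in full; the proofs are below) =====
def Claim_equal_f : Prop := ∀ (s : String) (w : String), Dom_f s w → Pre_f s w → Spec_f s w (f s w)

-- ===== LEMMAS AND PROOFS =====

-- B's scan as a foldr over the string: state (ans, distance-to-nearest-w-or-end)
def pairF (w : String) (l : List Char) : Int × Int :=
  l.foldr
    (fun ch st =>
      ((if (if String.ofList [ch] = w then 0 else st.2 + 1) > st.1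
          then (if String.ofList [ch] = w then (0 : Int) else st.2 + 1) else st.1),
       if String.ofList [ch] = w then (0 : Int) else st.2 + 1))
    (0, 0)

theorem f_alt_eq_pairF (s w : String) : f_alt s w = (pairF w s.toList).1 := by
  unfold f_alt pairF
  rw [List.foldl_reverse]

theorem pairF_nil (w : String) : pairF w [] = (0, 0) := rfl

theorem pairF_cons (w : String) (a : Char) (l : List Char) :
    pairF w (a :: l) =
      ((if (if String.ofList [a] = w then 0 else (pairF w l).2 + 1) > (pairF w l).1
          then (if String.ofList [a] = w then (0 : Int) else (pairF w l).2 + 1)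
          else (pairF w l).1),
       if String.ofList [a] = w then (0 : Int) else (pairF w l).2 + 1) := rfl

theorem pairF_nonneg (w : String) (l : List Char) :
    0 ≤ (pairF w l).2 ∧ (pairF w l).2 ≤ (pairF w l).1 := by
  induction l with
  | nil => simp [pairF_nil]
  | cons a t ih =>
    rw [pairF_cons]
    split_ifs <;> simp <;> omega

theorem pairF_fst_eq_zero_iff (w : String) (l : List Char) :
    (pairF w l).1 = 0 ↔ ∀ c ∈ l, String.ofList [c] = w := by
  induction l with
  | nil => simp [pairF_nil]
  | cons a t ih =>
    obtain ⟨h1, h2⟩ := pairF_nonneg w t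
    rw [pairF_cons]
    simp only [List.mem_cons, forall_eq_or_imp, ← ih]
    by_cases hq : String.ofList [a] = w
    · simp only [hq, true_and]
      split_ifs <;> constructor <;> intro <;> omega
    · simp only [if_neg hq]
      constructor
      · intro h
        exfalso
        split_ifs at h <;> omega
      · intro ⟨hqq, _⟩
        exact absurd hqq hq

-- A's string rebuilding, chars-wise: fStep writes (b if s[i+1]==w else a)
theorem fStep_cons_cons (w : String) (a b : Char) (t : List Char) :
    fStep w (a :: b :: t) = (if String.ofList [b] = w then b else a) :: fStep w (b :: t) := by
  show (if String.ofList [b] = w then w.toList else [a]) ++ _ = _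
  split_ifs with h
  · have hb : w.toList = [b] := by rw [← h, String.toList_ofList]
    simp [hb]
  · simp

-- the heart of the proof: one pass of A decreases both components of B's scan by 1 (floored at 0)
theorem pairF_fStep (w : String) (l : List Char) :
    pairF w (fStep w l) =
      (max ((pairF w l).1 - 1) 0, max ((pairF w l).2 - 1) 0) := by
  induction l with
  | nil => simp [fStep, pairF_nil]
  | cons a t ih =>
    cases t with
    | nil =>
      rw [show fStep w [a] = [] from rfl, pairF_nil, pairF_cons, pairF_nil]
      simp only [max_def, Prod.mk.injEq]
      split_ifs <;> omega
    | cons b t2 =>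
      obtain ⟨h1, h2⟩ := pairF_nonneg w t2
      rw [fStep_cons_cons, pairF_cons, ih, pairF_cons w b t2,
        pairF_cons w a (b :: t2), pairF_cons w b t2]
      by_cases hb : String.ofList [b] = w <;> by_cases ha : String.ofList [a] = w <;>
        simp only [hb, ha, if_pos, if_neg, not_false_iff] <;>
        simp only [max_def, Prod.mk.injEq] <;> split_ifs <;> omega

-- counting a single character is List.count
theorem count_go_single (c : Char) (l : List Char) (fuel acc : Nat)
    (hf : l.length ≤ fuel) :
    PySem.Chars.count.go [c] fuel l acc = acc + l.count c := by
  induction l generalizing fuel acc with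
  | nil => cases fuel <;> simp [PySem.Chars.count.go]
  | cons a t ih =>
    cases fuel with
    | zero => simp at hf
    | succ n =>
      simp only [List.length_cons] at hf
      by_cases h : a = c
      · have hp : List.isPrefixOf [c] (a :: t) = true := by
          subst h; simp [List.isPrefixOf]
        rw [PySem.Chars.count.go, if_pos hp]
        simp only [List.length_cons, List.length_nil, List.drop_succ_cons, List.drop_zero]
        rw [ih n (acc + 1) (by omega)]
        subst h
        rw [List.count_cons_self]
        omega
      · have hp : ¬ (List.isPrefixOf [c] (a :: t) = true) := by
          simp [List.isPrefixOf]
          exact fun hc => h hc.symm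
        rw [PySem.Chars.count.go, if_neg hp]
        rw [ih n acc (by omega)]
        simp [h]

theorem count_single (c : Char) (l : List Char) :
    PySem.Chars.count l [c] = l.count c := by
  unfold PySem.Chars.count
  rw [if_neg (by simp)]
  rw [count_go_single c l l.length 0 le_rfl]
  omega

-- a pattern of length ≥ 2 matches at most len/2 times (non-overlapping count)
theorem count_go_long (sub : List Char) (hs : 2 ≤ sub.length)
    (fuel : Nat) (l : List Char) (acc : Nat) :
    2 * PySem.Chars.count.go sub fuel l acc ≤ 2 * acc + l.length := by
  induction fuel generalizing l acc with
  | zero => cases l <;> simp [PySem.Chars.count.go]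
  | succ n ih =>
    cases l with
    | nil => simp [PySem.Chars.count.go]
    | cons a t =>
      rw [PySem.Chars.count.go]
      split_ifs with hp
      · have hlen : sub.length ≤ (a :: t).length :=
          (List.isPrefixOf_iff_prefix.mp hp).length_le
        have hm : sub.length + ((a :: t).length - sub.length) = (a :: t).length :=
          Nat.add_sub_cancel' hlen
        have hrec := ih (List.drop sub.length (a :: t)) (acc + 1)
        rw [List.length_drop] at hrec
        omega
      · have hrec := ih t acc
        simp only [List.length_cons]
        omega

theorem count_long (sub : List Char) (hs : 2 ≤ sub.length) (l : List Char) :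
    2 * PySem.Chars.count l sub ≤ l.length := by
  unfold PySem.Chars.count
  rw [if_neg (by cases sub with | nil => simp at hs | cons x xs => simp)]
  have := count_go_long sub hs l.length l 0
  omega

theorem count_nil_sub (sub : List Char) (h : sub ≠ []) :
    PySem.Chars.count ([] : List Char) sub = 0 := by
  unfold PySem.Chars.count
  rw [if_neg (by cases sub with | nil => exact absurd rfl h | cons x xs => simp)]
  simp [PySem.Chars.count.go]

theorem count_nil (w : String) (hw : w ≠ "") :
    PySem.Chars.count ([] : List Char) w.toList = 0 :=
  count_nil_sub w.toList (fun h => hw (String.toList_eq_nil_iff.mp h))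

-- A's break test 'count == length' says exactly 'every character equals w' (for w ≠ "")
theorem count_eq_length_iff (w : String) (hw : w ≠ "") (l : List Char) :
    PySem.Chars.count l w.toList = l.length ↔ ∀ c ∈ l, String.ofList [c] = w := by
  have hmk : ∀ c : Char, String.ofList [c] = w ↔ [c] = w.toList := fun c =>
    ⟨fun h => by rw [← h, String.toList_ofList],
     fun h => by rw [h, String.ofList_toList]⟩
  cases hcase : w.toList with
  | nil => exact absurd (String.toList_eq_nil_iff.mp hcase) hw
  | cons c1 rest =>
    cases rest with
    | nil =>
      rw [count_single, List.count_eq_length]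
      constructor
      · intro h c hc
        rw [hmk, hcase, h c hc]
      · intro h c hc
        have := (hmk c).mp (h c hc)
        rw [hcase] at this
        simp only [List.cons.injEq] at this
        simp [this.1]
    | cons c2 t =>
      have hs : 2 ≤ (c1 :: c2 :: t).length := by simp
      constructor
      · intro h
        have hcl := count_long (c1 :: c2 :: t) hs l
        rw [h] at hcl
        have hl : l = [] := by
          cases l with
          | nil => rfl
          | cons x xs => simp at hcl
        simp [hl]
      · intro h
        have hl : l = [] := by
          cases l with
          | nil => rfl
          | cons x xs =>
            have := (hmk x).mp (h x (by simp))
            rw [hcase] at this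
            simp at this
        subst hl
        rw [count_nil_sub (c1 :: c2 :: t) (by simp)]
        rfl

-- main invariant: A's loop returns cnt + the maximum distance B computes
theorem fLoop_eq (w : String) (hw : w ≠ "") :
    ∀ (n : Nat) (l : List Char) (cnt : Int), l.length ≤ n →
      fLoop w l (l.length : Int) cnt = cnt + (pairF w l).1 := by
  intro n
  induction n with
  | zero =>
    intro l cnt hl
    have hnil : l = [] := by cases l <;> simp_all
    subst hnil
    rw [fLoop.eq_def]
    simp [PySem.Str.count, count_nil w hw, pairF_nil]
  | succ n ih =>
    intro l cnt hl
    rw [fLoop.eq_def]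
    simp only [PySem.Str.count, String.toList_ofList]
    by_cases hk : ((PySem.Chars.count l w.toList : Int)) = (l.length : Int)
    · rw [if_pos hk]
      have hall : ∀ c ∈ l, String.ofList [c] = w :=
        (count_eq_length_iff w hw l).mp (by exact_mod_cast hk)
      rw [(pairF_fst_eq_zero_iff w l).mpr hall]
      ring
    · rw [if_neg hk]
      have hne : l ≠ [] := by
        intro h; subst h
        exact hk (by rw [count_nil w hw]; rfl)
      match l, hne with
      | a :: t, _ =>
        have hlen : (fStep w (a :: t)).length = t.length := fStep_length w a t
        have hstep : ((a :: t).length : Int) - 1 = ((fStep w (a :: t)).length : Int) := by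
          rw [hlen]; simp
        rw [hstep]
        show fLoop w (fStep w (a :: t)) ((fStep w (a :: t)).length : Int) (cnt + 1) =
          cnt + (pairF w (a :: t)).1
        rw [ih (fStep w (a :: t)) (cnt + 1) (by rw [hlen]; simp at hl; omega),
          pairF_fStep]
        have hA0 : (pairF w (a :: t)).1 ≠ 0 := by
          rw [Ne, pairF_fst_eq_zero_iff]
          intro hall
          exact hk (by exact_mod_cast (count_eq_length_iff w hw (a :: t)).mpr hall)
        obtain ⟨h1, h2⟩ := pairF_nonneg w (a :: t)
        omega

-- ===== VERDICT (by name: the statement is the Claim_ definition above) =====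
theorem f_spec : Claim_equal_f := by
  intro s w _ hw
  unfold Spec_f
  rw [f_alt_eq_pairF]
  unfold f
  have hlen : (PySem.Str.len s : Int) = (s.toList.length : Int) := by
    simp [PySem.Str.len]
  rw [hlen, fLoop_eq w hw s.toList.length s.toList 0 le_rfl]
  ring
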